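-- pv_equiv track=rewrite | github.com/jayaramcloud/scf | fw_functions.py | checkInterface
-- ===== SOURCE A (Python) =====
-- def checkInterface(iface):
--     if not iface or len(iface) > 16:
--         return False
--     for ch in [ ' ', '/', '!', ':', '*' ]:
--         # !:* are limits for iptables <= 1.4.5
--         if ch in iface:
--             return False
--     if iface == "+":
--         # limit for iptables <= 1.4.5
--         return False
--     return True
-- ===== SOURCE B (Python) =====
-- def checkInterface(iface):
--     # Single streaming pass: counts characters while checking them, bailing out
--     # as soon as the 17th character is reached or a forbidden one is seen; the
--     # wildcard special case falls out of the final count/first-character test, so no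
--     # len(), no substring scans, no whole-string equality.
--     count = 0
--     for c in iface:
--         count += 1
--         if count > 16 or c in {' ', '/', '!', ':', '*'}:
--             return False
--     return count > 1 or (count == 1 and iface[0] != '+')
-- ===== Notes on version B (the rewrite author's own statement) =====
-- stated objective: alternative
-- what changed: B is a single streaming pass that counts characters while validating them (early exit at the 17th or a forbidden character) and decides the wildcard/empty corner from the final count and first character, instead of A's separate len() guard, five substring scans and whole-string equality test.
import Mathlib
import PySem

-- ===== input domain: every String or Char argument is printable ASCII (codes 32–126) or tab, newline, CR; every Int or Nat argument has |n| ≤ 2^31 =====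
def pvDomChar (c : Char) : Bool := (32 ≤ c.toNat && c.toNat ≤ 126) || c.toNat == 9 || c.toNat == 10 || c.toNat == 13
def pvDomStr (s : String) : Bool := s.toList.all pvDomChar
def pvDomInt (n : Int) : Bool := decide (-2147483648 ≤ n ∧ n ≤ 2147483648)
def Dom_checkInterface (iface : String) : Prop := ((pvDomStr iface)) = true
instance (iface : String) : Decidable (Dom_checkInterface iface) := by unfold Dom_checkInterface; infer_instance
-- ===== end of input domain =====

-- ===== PORT A =====
-- A: len() guard, five substring scans, whole-string "+" equality; B: one streaming
-- pass counting characters with early exit, deciding the wildcard corner from count/first char. Objective: alternative.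
def checkInterface (iface : String) : Bool :=
  if iface.toList.isEmpty || decide (16 < PySem.Str.len iface) then false
  else if [" ", "/", "!", ":", "*"].any (fun ch => PySem.Str.isIn ch iface) then false
  else if iface.toList == ['+'] then false
  else true

-- ===== PORT B =====
def pvForbidden : List Char := [' ', '/', '!', ':', '*']

-- the loop of Source B: returns none on an early `return False`, otherwise the final count
def pvScan : List Char → Nat → Option Nat
  | [], count => some count
  | c :: rest, count =>
      if 16 < count + 1 || pvForbidden.contains c then none
      else pvScan rest (count + 1)

def checkInterface_alt (iface : String) : Bool :=
  match pvScan iface.toList 0 with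
  | none => false
  | some count => decide (1 < count) || (count == 1 && !(iface.toList[0]? == some '+'))

-- ===== PRECONDITION & SPEC =====
def Spec_checkInterface (iface : String) (out : Bool) : Prop := out = checkInterface_alt iface
instance (iface : String) (out : Bool) : Decidable (Spec_checkInterface iface out) := by unfold Spec_checkInterface; infer_instance

-- ===== CLAIM (what is proved, stated in full; the proofs are below) =====
def Claim_equal_checkInterface : Prop := ∀ (iface : String), Dom_checkInterface iface → Spec_checkInterface iface (checkInterface iface)

-- ===== LEMMAS AND PROOFS =====

-- closed form of B's scanning loop (valid for start counts ≤ 16, which the loop maintains)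
lemma pvScan_eq (l : List Char) : ∀ n, n ≤ 16 →
    pvScan l n = if n + l.length ≤ 16 ∧ ∀ c ∈ l, c ∉ pvForbidden then some (n + l.length) else none := by
  induction l with
  | nil => intro n hn; simp [pvScan, hn]
  | cons c rest ih =>
    intro n hn
    by_cases h16 : 16 < n + 1
    · simp only [pvScan, h16, decide_true, Bool.true_or, if_true]
      rw [if_neg]; rintro ⟨h, -⟩; simp [List.length_cons] at h; omega
    · by_cases hc : c ∈ pvForbidden
      · simp only [pvScan]
        rw [if_pos (by simp [hc]), if_neg (by rintro ⟨-, h⟩; exact h c (by simp) hc)]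
      · simp only [pvScan]
        rw [if_neg (by simp [h16, hc]), ih (n + 1) (by omega)]
        have : (n + 1 + rest.length ≤ 16 ∧ ∀ x ∈ rest, x ∉ pvForbidden)
             ↔ (n + (c :: rest).length ≤ 16 ∧ ∀ x ∈ c :: rest, x ∉ pvForbidden) := by
          simp only [List.length_cons, List.mem_cons]
          constructor
          · rintro ⟨h1, h2⟩
            exact ⟨by omega, by rintro x (rfl | hx); exact hc; exact h2 x hx⟩
          · rintro ⟨h1, h2⟩
            exact ⟨by omega, fun x hx => h2 x (Or.inr hx)⟩
        split_ifs with hA hB hB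
        · simp [List.length_cons]; omega
        · exact absurd (this.mp hA) hB
        · exact absurd (this.mpr hB) hA
        · rfl

-- A's five substring scans test exactly "some character of iface is forbidden"
lemma pv_mid_eq (iface : String) :
    ([" ", "/", "!", ":", "*"].any (fun ch => PySem.Str.isIn ch iface))
      = iface.toList.any (fun c => pvForbidden.contains c) := by
  rw [Bool.eq_iff_iff]
  simp only [List.any_cons, List.any_nil, Bool.or_false, Bool.or_eq_true, List.any_eq_true,
    List.contains_eq_mem, pvForbidden, decide_eq_true_eq,
    PySem.Str.isIn_iff_infix]
  rw [show (" " : String).toList = [' '] from rfl, show ("/" : String).toList = ['/'] from rfl,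
    show ("!" : String).toList = ['!'] from rfl, show (":" : String).toList = [':'] from rfl,
    show ("*" : String).toList = ['*'] from rfl]
  simp only [List.singleton_infix_iff]
  constructor
  · rintro (h1|h2|h3|h4|h5) <;>
      [exact ⟨' ', h1, by simp⟩; exact ⟨'/', h2, by simp⟩;
       exact ⟨'!', h3, by simp⟩; exact ⟨':', h4, by simp⟩;
       exact ⟨'*', h5, by simp⟩]
  · rintro ⟨c, hc, hm⟩
    simp only [List.mem_cons, List.not_mem_nil, or_false] at hm
    rcases hm with rfl|rfl|rfl|rfl|rfl <;> tauto

theorem checkInterface_spec : Claim_equal_checkInterface := by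
  intro iface _
  unfold Spec_checkInterface checkInterface checkInterface_alt
  rw [pvScan_eq iface.toList 0 (by omega), pv_mid_eq]
  have hlen : PySem.Str.len iface = (iface.toList.length : Int) := by
    simp [PySem.Str.len]
  rw [hlen]
  generalize iface.toList = l
  cases l with
  | nil => simp
  | cons c rest =>
    by_cases hforb : ∀ x ∈ c :: rest, x ∉ pvForbidden
    · have hany : ((c :: rest).any fun x => pvForbidden.contains x) = false := by
        simp only [List.any_eq_false, List.contains_eq_mem, Bool.not_eq_true,
          decide_eq_false_iff_not]
        exact hforb
      by_cases h16 : (c :: rest).length ≤ 16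
      · have hcond : 0 + (c :: rest).length ≤ 16 ∧ ∀ x ∈ c :: rest, x ∉ pvForbidden :=
          ⟨by omega, hforb⟩
        rw [if_pos hcond]
        have hA : ((c :: rest).isEmpty || decide (16 < ((c :: rest).length : Int))) = false := by
          simp only [List.isEmpty_cons, Bool.false_or, decide_eq_false_iff_not, not_lt]
          omega
        rw [hA, hany]
        simp only [Bool.false_eq_true, if_false]
        cases rest with
        | nil =>
          by_cases hp : c = '+'
          · subst hp; simp
          · simp [hp]
        | cons d rest' => simp
      · have hcond : ¬ (0 + (c :: rest).length ≤ 16 ∧ ∀ x ∈ c :: rest, x ∉ pvForbidden) := by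
          rintro ⟨h, -⟩; omega
        rw [if_neg hcond]
        have hA : ((c :: rest).isEmpty || decide (16 < ((c :: rest).length : Int))) = true := by
          simp only [Bool.or_eq_true, decide_eq_true_eq]
          right; omega
        rw [hA]
        simp
    · have hcond : ¬ (0 + (c :: rest).length ≤ 16 ∧ ∀ x ∈ c :: rest, x ∉ pvForbidden) := by
        rintro ⟨-, h⟩; exact hforb h
      rw [if_neg hcond]
      have hany : ((c :: rest).any fun x => pvForbidden.contains x) = true := by
        simp only [List.any_eq_true, List.contains_eq_mem, decide_eq_true_eq]
        rcases not_forall.mp hforb with ⟨x, hx⟩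
        rcases Classical.not_imp.mp hx with ⟨hxm, hxf⟩
        exact ⟨x, hxm, not_not.mp hxf⟩
      rw [hany]
      by_cases hA : ((c :: rest).isEmpty || decide (16 < ((c :: rest).length : Int))) = true
      · rw [hA]; simp
      · simp only [Bool.not_eq_true] at hA
        rw [hA]; simp
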